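-- pv_equiv track=rewrite | github.com/BadreElmrbt/L3 | UEINF3 - Ateliers de programmation/Atelier_2/Ex_5/Ex_5.py | agencement_objets
-- ===== SOURCE A (Python) =====
-- def agencement_objets(nbEmplacement:int, lObjets:list):
--     if nbEmplacement * 2 >= len(lObjets) :
--         lObjets.sort()
--
--         uniques = []
--         doublons = []
--
--         vitrine1 = []
--         vitrine2 = []
--
--         # Repérer les objets uniques et les doublons
--         for objet in lObjets:
--             if lObjets.count(objet) == 1:
--                 uniques.append(objet)
--             elif lObjets.count(objet) == 2:
--                 doublons.append(objet)
--             else :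
--                 return None
--
--         # Répartir les doublons entre les deux vitrines
--         doublon_count = 0
--         for doublon in doublons:
--             if doublon_count % 2 == 0:
--                 vitrine1.append(doublon)
--             else:
--                 vitrine2.append(doublon)
--             doublon_count += 1
--
--         # Remplir les vitrines avec les objets restants
--         for objet in uniques:
--             if len(vitrine1) < nbEmplacement:
--                 vitrine1.append(objet)
--             else:
--                 vitrine2.append(objet)
--
--         vitrine1.sort()
--         vitrine2.sort()
--
--         return (vitrine1, vitrine2)
--     else:
--         return None
-- ===== SOURCE B (Python) =====
-- def agencement_objets(nbEmplacement: int, lObjets: list):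
--     # single pass over runs of the sorted list instead of per-element count() scans;
--     # keeps A's in-place sort of lObjets
--     if nbEmplacement * 2 < len(lObjets):
--         return None
--     lObjets.sort()
--     n = len(lObjets)
--     vitrine1 = []
--     vitrine2 = []
--     uniques = []
--     i = 0
--     while i < n:
--         j = i
--         while j < n and lObjets[j] == lObjets[i]:
--             j += 1
--         run = j - i
--         if run == 1:
--             uniques.append(lObjets[i])
--         elif run == 2:
--             vitrine1.append(lObjets[i])
--             vitrine2.append(lObjets[i])
--         else:
--             return None
--         i = j
--     for objet in uniques:
--         if len(vitrine1) < nbEmplacement: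
--             vitrine1.append(objet)
--         else:
--             vitrine2.append(objet)
--     vitrine1.sort()
--     vitrine2.sort()
--     return (vitrine1, vitrine2)
-- ===== Notes on version B (the rewrite author's own statement) =====
-- stated objective: alternative
-- what changed: Replaces A's per-element lObjets.count() scans and the parity-counter split of the doublons list by a single run-length pass over the sorted list that classifies each distinct value once and appends a duplicated value directly to both vitrines.
import Mathlib
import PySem

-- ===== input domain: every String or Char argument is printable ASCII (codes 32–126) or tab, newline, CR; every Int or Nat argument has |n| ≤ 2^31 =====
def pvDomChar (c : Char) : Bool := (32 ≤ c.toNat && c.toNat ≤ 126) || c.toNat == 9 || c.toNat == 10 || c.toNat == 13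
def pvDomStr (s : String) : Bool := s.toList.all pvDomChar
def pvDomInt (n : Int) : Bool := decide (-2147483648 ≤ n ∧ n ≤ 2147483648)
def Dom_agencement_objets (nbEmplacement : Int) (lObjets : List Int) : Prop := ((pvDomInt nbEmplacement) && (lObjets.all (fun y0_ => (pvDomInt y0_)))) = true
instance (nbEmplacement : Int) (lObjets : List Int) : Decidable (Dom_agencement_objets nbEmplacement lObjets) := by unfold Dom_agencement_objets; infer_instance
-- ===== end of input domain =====

-- B replaces A's per-element count() scans and parity-split of the doublons by one run-length
-- pass over the sorted list; both Pythons sort lObjets in place — the equivalence proved here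
-- is about the return value.


-- ===== PORT A =====
-- the classification loop: for objet in lObjets (early 'return None' modelled as Option)
def classifyA (full : List Int) : List Int → Option (List Int × List Int)
  | [] => some ([], [])
  | x :: rest =>
    if PySem.List.count full x = 1 then
      (classifyA full rest).map (fun ud => (x :: ud.1, ud.2))
    else if PySem.List.count full x = 2 then
      (classifyA full rest).map (fun ud => (ud.1, x :: ud.2))
    else none

def agencement_objets (nbEmplacement : Int) (lObjets : List Int) : Option (List Int × List Int) :=
  if nbEmplacement * 2 ≥ (lObjets.length : Int) then
    let s := PySem.List.sorted lObjets (fun x => x) false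
    match classifyA s s with
    | none => none
    | some (uniques, doublons) =>
      let st := doublons.foldl (fun (st : (List Int × List Int) × Int) d =>
          if PySem.Int.mod st.2 2 = 0 then ((st.1.1 ++ [d], st.1.2), st.2 + 1)
          else ((st.1.1, st.1.2 ++ [d]), st.2 + 1)) (([], []), 0)
      let vv := uniques.foldl (fun (vv : List Int × List Int) o =>
          if (vv.1.length : Int) < nbEmplacement then (vv.1 ++ [o], vv.2)
          else (vv.1, vv.2 ++ [o])) st.1
      some (PySem.List.sorted vv.1 (fun x => x) false, PySem.List.sorted vv.2 (fun x => x) false)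
  else none

-- ===== PORT B =====
-- the run-scanning while loop: the inner while computes the run of the head value
def runsB : List Int → Option (List Int × List Int)
  | [] => some ([], [])
  | x :: rest =>
    let run := rest.takeWhile (· == x)
    let rest' := rest.dropWhile (· == x)
    if run.length = 0 then (runsB rest').map (fun pu => (pu.1, x :: pu.2))
    else if run.length = 1 then (runsB rest').map (fun pu => (x :: pu.1, pu.2))
    else none
  termination_by l => l.length
  decreasing_by
    all_goals
      simp only [List.length_cons]
      exact Nat.lt_succ_of_le (List.length_dropWhile_le _ _)

def agencement_objets_alt (nbEmplacement : Int) (lObjets : List Int) : Option (List Int × List Int) :=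
  if nbEmplacement * 2 < (lObjets.length : Int) then none
  else
    let s := PySem.List.sorted lObjets (fun x => x) false
    match runsB s with
    | none => none
    | some (pairs, uniques) =>
      let vv := uniques.foldl (fun (vv : List Int × List Int) o =>
          if (vv.1.length : Int) < nbEmplacement then (vv.1 ++ [o], vv.2)
          else (vv.1, vv.2 ++ [o])) (pairs, pairs)
      some (PySem.List.sorted vv.1 (fun x => x) false, PySem.List.sorted vv.2 (fun x => x) false)

-- ===== PRECONDITION & SPEC =====
def Spec_agencement_objets (nbEmplacement : Int) (lObjets : List Int) (out : Option (List Int × List Int)) : Prop := out = agencement_objets_alt nbEmplacement lObjets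
instance (nbEmplacement : Int) (lObjets : List Int) (out : Option (List Int × List Int)) : Decidable (Spec_agencement_objets nbEmplacement lObjets out) := by unfold Spec_agencement_objets; infer_instance

-- ===== CLAIM (what is proved, stated in full; the proofs are below) =====
def Claim_equal_agencement_objets : Prop := ∀ (nbEmplacement : Int) (lObjets : List Int), Dom_agencement_objets nbEmplacement lObjets → Spec_agencement_objets nbEmplacement lObjets (agencement_objets nbEmplacement lObjets)

-- ===== LEMMAS AND PROOFS =====

-- PySem.List.count is Mathlib's List.count with flipped arguments
theorem pycount_eq (l : List Int) (y : Int) : PySem.List.count l y = List.count y l := rfl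

-- the first element surviving dropWhile fails the predicate
theorem dropWhile_head_false {p : Int → Bool} :
    ∀ (l : List Int) (h0 : Int) (t : List Int), l.dropWhile p = h0 :: t → p h0 = false := by
  intro l
  induction l with
  | nil => intro h0 t h; simp at h
  | cons a l ih =>
    intro h0 t h
    by_cases hp : p a
    · rw [List.dropWhile_cons_of_pos hp] at h; exact ih h0 t h
    · rw [List.dropWhile_cons_of_neg hp] at h
      injection h with h1 _
      rw [← h1]; exact Bool.not_eq_true _ ▸ hp

-- on a sorted list with head x, everything after the initial run of x's is > x
theorem dropWhile_gt (x : Int) (rest : List Int)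
    (hp : (x :: rest).Pairwise (· ≤ ·)) :
    ∀ y ∈ rest.dropWhile (fun y => y == x), x < y := by
  rw [List.pairwise_cons] at hp
  obtain ⟨hle, hrest⟩ := hp
  cases hd : rest.dropWhile (fun y => y == x) with
  | nil => intro y hy; exact absurd hy (List.not_mem_nil)
  | cons h0 t =>
    have hne : h0 ≠ x := by
      have hh := dropWhile_head_false rest h0 t hd
      simpa using hh
    have hmem : ∀ y ∈ h0 :: t, y ∈ rest := fun y hy =>
      (List.dropWhile_sublist _).mem (hd ▸ hy)
    have hx0 : x < h0 := lt_of_le_of_ne (hle h0 (hmem h0 (by simp))) (Ne.symm hne)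
    have hpair' : (h0 :: t).Pairwise (· ≤ ·) :=
      hd ▸ hrest.sublist (List.dropWhile_sublist _)
    intro y hy
    rcases List.mem_cons.mp hy with rfl | hyt
    · exact hx0
    · exact lt_of_lt_of_le hx0 ((List.pairwise_cons.mp hpair').1 y hyt)

-- key bridge: on a sorted list whose element counts agree with `full`,
-- A's count-based classification is B's run decomposition
theorem classify_eq_runs (full : List Int) : ∀ (n : Nat) (l : List Int), l.length ≤ n →
    l.Pairwise (· ≤ ·) →
    (∀ y ∈ l, PySem.List.count full y = PySem.List.count l y) →
    classifyA full l = (runsB l).map (fun pu => (pu.2, pu.1.flatMap (fun x => [x, x]))) := by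
  intro n
  induction n with
  | zero =>
    intro l hl _ _
    have hnil : l = [] := List.eq_nil_of_length_eq_zero (by omega)
    subst hnil; simp [classifyA, runsB]
  | succ n ih =>
    intro l hl hp hc
    cases l with
    | nil => simp [classifyA, runsB]
    | cons x rest =>
      set run := rest.takeWhile (fun y => y == x) with hrun
      set rest' := rest.dropWhile (fun y => y == x) with hrest'
      have hsplit : run ++ rest' = rest := by
        rw [hrun, hrest']; exact List.takeWhile_append_dropWhile
      have hgt : ∀ y ∈ rest', x < y := by
        rw [hrest']; exact dropWhile_gt x rest hp
      have hxr : x ∉ rest' := fun h => lt_irrefl x (hgt x h)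
      have hlen' : rest'.length ≤ n := by
        have h1 : rest'.length ≤ rest.length := by
          rw [hrest']; exact List.length_dropWhile_le _ _
        have h2 : (x :: rest).length = rest.length + 1 := List.length_cons
        omega
      have hp' : rest'.Pairwise (· ≤ ·) := by
        rw [hrest']
        exact ((List.pairwise_cons.mp hp).2).sublist (List.dropWhile_sublist _)
      have hrx : ∀ y ∈ run, y = x := by
        intro y hy
        rw [hrun] at hy
        have := List.mem_takeWhile_imp hy
        simpa using this
      have hcx : List.count x (x :: rest) = run.length + 1 := by
        rw [List.count_cons_self, ← hsplit, List.count_append,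
          List.count_eq_zero.mpr hxr,
          List.count_eq_length.mpr (fun b hb => (hrx b hb).symm)]
      have hfullx : PySem.List.count full x = run.length + 1 := by
        rw [hc x List.mem_cons_self, pycount_eq, hcx]
      have hc' : ∀ y ∈ rest', PySem.List.count full y = PySem.List.count rest' y := by
        intro y hy
        have hyx : y ≠ x := ne_of_gt (hgt y hy)
        have hyr : y ∈ rest := hsplit ▸ List.mem_append_right _ hy
        rw [hc y (List.mem_cons_of_mem _ hyr), pycount_eq, pycount_eq]
        have : List.count y (x :: rest) = List.count y rest' := by
          rw [← hsplit]
          simp [List.count_append,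
            (show ¬ x = y from fun h => hyx h.symm),
            List.count_eq_zero.mpr (fun hmem => hyx (hrx y hmem))]
        exact this
      rw [runsB, ← hrun, ← hrest']
      by_cases h0 : run.length = 0
      · have hrun0 : run = [] := List.length_eq_zero_iff.mp h0
        have hr : rest = rest' := by rw [← hsplit, hrun0, List.nil_append]
        have hfx : PySem.List.count full x = 1 := by rw [hfullx, h0]
        rw [if_pos h0]
        simp only [classifyA]
        rw [hfx, hr, ih rest' hlen' hp' hc']
        cases runsB rest' with
        | none => rfl
        | some pu => rfl
      · by_cases h1 : run.length = 1
        · obtain ⟨a, ha⟩ := List.length_eq_one_iff.mp h1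
          have hax : a = x := hrx a (ha ▸ List.mem_singleton_self a)
          have hr : rest = x :: rest' := by
            rw [← hsplit, ha, hax, List.singleton_append]
          have hfx : PySem.List.count full x = 2 := by rw [hfullx, h1]
          rw [if_neg h0, if_pos h1]
          conv_lhs => rw [hr]
          simp only [classifyA]
          rw [hfx, ih rest' hlen' hp' hc']
          cases runsB rest' with
          | none => rfl
          | some pu => rfl
        · rw [if_neg h0, if_neg h1]
          simp only [classifyA]
          rw [hfullx]
          rw [if_neg (by omega), if_neg (by omega)]
          rfl

-- A's alternating split of the doublons list [x,x for x in p] is (p, p)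
theorem split_doublons (p : List Int) : ∀ (a b : List Int) (c : Int),
    PySem.Int.mod c 2 = 0 →
    (p.flatMap (fun x => [x, x])).foldl (fun (st : (List Int × List Int) × Int) d =>
          if PySem.Int.mod st.2 2 = 0 then ((st.1.1 ++ [d], st.1.2), st.2 + 1)
          else ((st.1.1, st.1.2 ++ [d]), st.2 + 1)) ((a, b), c)
      = ((a ++ p, b ++ p), c + 2 * p.length) := by
  induction p with
  | nil => intro a b c hc; simp
  | cons x p ih =>
    intro a b c hc
    rw [PySem.Int.mod_eq_emod_of_pos (by norm_num)] at hc
    simp only [List.flatMap_cons, List.cons_append, List.nil_append, List.foldl_cons]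
    rw [if_pos (show PySem.Int.mod c 2 = 0 by
      rw [PySem.Int.mod_eq_emod_of_pos (by norm_num)]; omega)]
    rw [if_neg (show ¬ PySem.Int.mod (c + 1) 2 = 0 by
      rw [PySem.Int.mod_eq_emod_of_pos (by norm_num)]; omega)]
    rw [ih (a ++ [x]) (b ++ [x]) (c + 1 + 1)
      (by rw [PySem.Int.mod_eq_emod_of_pos (by norm_num)]; omega)]
    simp only [List.append_assoc, List.singleton_append, List.length_cons]
    refine congrArg₂ Prod.mk rfl ?_
    push_cast; ring

-- ===== VERDICT (by name: the statement is the Claim_ definition above) =====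
theorem agencement_objets_spec : Claim_equal_agencement_objets := by
  intro nb l _
  unfold Spec_agencement_objets
  by_cases hg : nb * 2 ≥ (l.length : Int)
  · simp only [agencement_objets, agencement_objets_alt, if_pos hg,
      if_neg (show ¬ nb * 2 < (l.length : Int) by omega)]
    set s := PySem.List.sorted l (fun x => x) false with hs
    have hpair : s.Pairwise (· ≤ ·) := PySem.List.sorted_pairwise l (fun x => x)
    rw [classify_eq_runs s s.length s le_rfl hpair (fun y _ => rfl)]
    cases hr : runsB s with
    | none => simp
    | some pu =>
      obtain ⟨p, u⟩ := pu
      simp only [Option.map_some]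
      have hsp := split_doublons p [] [] 0 (by decide)
      simp only [List.nil_append] at hsp
      rw [hsp]
  · simp only [agencement_objets, agencement_objets_alt, if_neg hg,
      if_pos (show nb * 2 < (l.length : Int) by omega)]
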